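-- pv_equiv track=rewrite | github.com/thepinkmile/Enigma-NG | design/Electronics/Rotor/STGC_Generator.py | find_stgc
-- ===== SOURCE A (Python) =====
-- def find_stgc(num_positions, num_sensors):
--     def get_word(track, pos):
--         # Extract n bits starting from 'pos', wrapping around the track
--         word = 0
--         for i in range(num_sensors):
--             bit = track[(pos + i) % len(track)]
--             word |= (bit << i)
--         return word
--
--     def is_gray(w1, w2):
--         # Check if exactly one bit changed
--         diff = w1 ^ w2
--         return diff != 0 and (diff & (diff - 1)) == 0
--
--     def backtrack(track, used_words):
--         if len(track) == num_positions:
--             # Check cyclic Gray property (last word vs first word)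
--             if is_gray(get_word(track, num_positions - 1), get_word(track, 0)):
--                 return track
--             return None
--
--         # Try appending 1 or 0
--         for bit in [1, 0]:
--             track.append(bit)
--             current_pos = len(track) - num_sensors
--
--             if current_pos >= 0:
--                 new_word = get_word(track, current_pos)
--                 prev_word = get_word(track, current_pos - 1)
--
--                 if new_word not in used_words and is_gray(prev_word, new_word):
--                     used_words.add(new_word)
--                     if backtrack(track, used_words): return track
--                     used_words.remove(new_word)
--             else:
--                 # Still building initial 'seed' bits
--                 if backtrack(track, used_words): return track
--
--             track.pop()
--         return None
--
--     # Start with a string of zeros equal to sensor count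
--     start_track = [0] * num_sensors
--     return backtrack(start_track, {0})
-- ===== SOURCE B (Python) =====
-- def find_stgc(num_positions, num_sensors):
--     # Iterative DFS with an explicit stack of immutable snapshot frames
--     # (track, used-words, bit choices left to try) instead of recursion with
--     # in-place append/add/remove undo bookkeeping.  Same exploration order
--     # (bit 1 before bit 0), so the same first result is found.
--     n = num_sensors
--
--     def get_word(track, pos):
--         word = 0
--         for i in range(n):
--             word |= track[(pos + i) % len(track)] << i
--         return word
--
--     def is_gray(w1, w2):
--         d = w1 ^ w2
--         return d != 0 and (d & (d - 1)) == 0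
--
--     start = [0] * n
--     if len(start) == num_positions:
--         if is_gray(get_word(start, num_positions - 1), get_word(start, 0)):
--             return start
--         return None
--
--     stack = [(start, frozenset([0]), (1, 0))]
--     while stack:
--         track, used, bits = stack.pop()
--         if not bits:
--             continue
--         bit, rest = bits[0], bits[1:]
--         stack.append((track, used, rest))
--         cand = track + [bit]
--         pos = len(cand) - n
--         w = get_word(cand, pos)
--         if w in used or not is_gray(get_word(cand, pos - 1), w):
--             continue
--         if len(cand) == num_positions:
--             if is_gray(get_word(cand, num_positions - 1), get_word(cand, 0)):
--                 return cand
--             continue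
--         stack.append((cand, used | {w}, (1, 0)))
--     return None
-- ===== Notes on version B (the rewrite author's own statement) =====
-- stated objective: alternative
-- what changed: The recursive backtracking (in-place track.append/pop and used_words.add/remove undo bookkeeping) is replaced by an iterative loop over an explicit stack of immutable snapshot frames (track, used-word set, remaining bit choices), preserving the exact 1-before-0 exploration order; no Python recursion and no undo logic remain.
import Mathlib
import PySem

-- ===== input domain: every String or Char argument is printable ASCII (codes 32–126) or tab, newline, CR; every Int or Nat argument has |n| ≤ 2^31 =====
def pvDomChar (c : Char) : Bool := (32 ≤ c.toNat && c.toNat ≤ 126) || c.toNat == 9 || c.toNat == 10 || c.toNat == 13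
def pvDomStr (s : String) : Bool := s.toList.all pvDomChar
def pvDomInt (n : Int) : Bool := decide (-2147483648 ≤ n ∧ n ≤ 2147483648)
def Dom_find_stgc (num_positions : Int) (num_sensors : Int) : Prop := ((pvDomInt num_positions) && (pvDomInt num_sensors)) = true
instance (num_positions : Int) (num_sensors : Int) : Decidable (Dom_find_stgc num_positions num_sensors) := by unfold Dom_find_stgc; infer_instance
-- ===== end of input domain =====

-- B replaces A's recursive backtracking (with in-place append/pop and used-set add/remove undo)
-- by an iterative loop over an explicit stack of immutable snapshot frames; same first-found result.

-- ===== PORT A =====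

-- helper get_word (shared by both Pythons verbatim): n-bit word read from 'track' starting at 'pos',
-- wrapping around; 'bit << i' is 'bit <<< i.toNat' (exact: i ≥ 0 comes from range(num_sensors)).
-- The index (pos+i) % len(track) is Python-exact via PySem.Int.mod; it is always in range when the
-- list is nonempty, so the '.getD 0' default of pyGet? is never used (and with an empty track the
-- range(num_sensors) loop is empty, so no indexing happens — matching Python, which never raises here).
def pvGetWord (ns : Int) (track : List Int) (pos : Int) : Int :=
  (PySem.List.pyRange 0 ns 1).foldl
    (fun word i =>
      PySem.Int.bor word
        (((PySem.List.pyGet? track (PySem.Int.mod (pos + i) (track.length : Int))).getD 0) <<< i.toNat))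
    0

-- helper is_gray (shared by both Pythons verbatim)
def pvIsGray (w1 w2 : Int) : Bool :=
  let d := PySem.Int.bxor w1 w2
  d != 0 && PySem.Int.band d (d - 1) == 0

-- A's 'for bit in [1, 0]' loop body, structurally recursive over the remaining bits.
-- Result convention for the fueled port: 'none' = out of fuel, 'some r' = the Python returns r.
-- Python's used_words.add(new_word) / .remove(new_word) pair is modelled persistently: the recursive
-- call receives 'used.add new_word' and the continuation after a failed call reverts to 'used'
-- (exact: new_word ∉ used is guarded, so add-then-remove restores the set unchanged).
def pvTryBitsA (np ns : Int) (recur : List Int → PySem.Set Int → Option (Option (List Int)))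
    (track : List Int) (used : PySem.Set Int) : List Int → Option (Option (List Int))
  | [] => some none                                      -- loop fell through: return None
  | b :: bs =>
    let cand := track ++ [b]                             -- track.append(bit)
    let cur : Int := (cand.length : Int) - ns            -- current_pos = len(track) - num_sensors
    let res :=
      if 0 ≤ cur then
        let nw := pvGetWord ns cand cur
        let pw := pvGetWord ns cand (cur - 1)
        if !(PySem.Set.contains used nw) && pvIsGray pw nw then
          recur cand (PySem.Set.add used nw)             -- used.add; backtrack(track, used)
        else some none                                   -- guard failed: this bit is skipped
      else recur cand used                               -- seed phase: descend without recording a word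
    match res with
    | none => none                                       -- out of fuel (propagate)
    | some (some r) => some (some r)                     -- 'if backtrack(...): return track' (track == r here)
    | some none => pvTryBitsA np ns recur track used bs  -- track.pop(); used restored; next bit
def pvBacktrackA (np ns : Int) : Nat → List Int → PySem.Set Int → Option (Option (List Int))
  | 0, _, _ => none
  | fuel + 1, track, used =>
    if (track.length : Int) = np then
      some (if pvIsGray (pvGetWord ns track (np - 1)) (pvGetWord ns track 0) then some track else none)
    else
      pvTryBitsA np ns (pvBacktrackA np ns fuel) track used [1, 0]

-- Fuel = recursion depth bound. Every non-seed descent inserts a fresh word in [0, 2^ns) into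
-- used_words, so the depth is < 2^ns; pvSuf below proves this fuel never runs out.
def pvFuelA (ns : Int) : Nat := 2 ^ ns.toNat + 2

def find_stgc (num_positions : Int) (num_sensors : Int) : Option (List Int) :=
  let start : List Int := List.replicate num_sensors.toNat 0   -- [0] * num_sensors
  match pvBacktrackA num_positions num_sensors (pvFuelA num_sensors) start (PySem.Set.ofList [0]) with
  | some r => r
  | none => none                                               -- fuel exhausted: unreachable (pvSuf)

-- ===== PORT B =====

-- Source B's while-loop over the explicit stack; top of the Python list-stack = head of the Lean list.
-- Frames are immutable snapshots (track, used, remaining bits); 'used | {w}' is Set.add (w ∉ used is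
-- guarded).  Each frame additionally carries a Nat depth budget 'd' (termination apparatus only, not
-- data of Source B): a child frame gets d-1 and 'none' is returned if the budget hits 0, which pvSim
-- below proves unreachable from the initial budget.
def pvLoopB (np ns : Int) : List (Nat × List Int × PySem.Set Int × List Int) → Option (Option (List Int))
  | [] => some none                                        -- while loop ended: return None
  | (d, track, used, bits) :: rest =>
    match bits with
    | [] => pvLoopB np ns rest                             -- frame exhausted: discard it
    | b :: bs =>
      let cand := track ++ [b]
      let pos : Int := (cand.length : Int) - ns
      let w := pvGetWord ns cand pos
      if PySem.Set.contains used w || !(pvIsGray (pvGetWord ns cand (pos - 1)) w) then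
        pvLoopB np ns ((d, track, used, bs) :: rest)
      else if (cand.length : Int) = np then
        if pvIsGray (pvGetWord ns cand (np - 1)) (pvGetWord ns cand 0) then some (some cand)
        else pvLoopB np ns ((d, track, used, bs) :: rest)
      else
        match d with
        | 0 => none                                        -- depth budget exhausted: unreachable (pvSim)
        | d' + 1 =>
          pvLoopB np ns ((d', cand, PySem.Set.add used w, [1, 0]) :: (d' + 1, track, used, bs) :: rest)
termination_by stack => (stack.map (fun fr => 4 ^ fr.1 * (fr.2.2.2.length + 1))).sum
decreasing_by
  · simp only [List.map_cons, List.sum_cons]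
    have h1 : 0 < 4 ^ d * (([] : List Int).length + 1) := by positivity
    omega
  · simp only [List.map_cons, List.sum_cons, List.length_cons]
    have h1 : 0 < 4 ^ d := by positivity
    have h2 : 4 ^ d * (bs.length + 1 + 1) = 4 ^ d * (bs.length + 1) + 4 ^ d := by ring
    omega
  · simp only [List.map_cons, List.sum_cons, List.length_cons]
    have h1 : 0 < 4 ^ d := by positivity
    have h2 : 4 ^ d * (bs.length + 1 + 1) = 4 ^ d * (bs.length + 1) + 4 ^ d := by ring
    omega
  · simp only [List.map_cons, List.sum_cons, List.length_cons, Nat.succ_eq_add_one]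
    have h1 : 0 < 4 ^ d' := by positivity
    have h2 : 4 ^ (d' + 1) * (bs.length + 1 + 1) = 4 ^ (d' + 1) * (bs.length + 1) + 4 * 4 ^ d' := by ring
    have h4 : 4 ^ d' * (([] : List Int).length + 1 + 1 + 1) = 3 * 4 ^ d' := by
      simp only [List.length_nil]; ring
    omega

-- initial depth budget = pvFuelA ns - 1: the budget of A's top-level bit loop
def pvBudgetB (ns : Int) : Nat := 2 ^ ns.toNat + 1

def find_stgc_alt (num_positions : Int) (num_sensors : Int) : Option (List Int) :=
  let start : List Int := List.replicate num_sensors.toNat 0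
  if (start.length : Int) = num_positions then
    if pvIsGray (pvGetWord num_sensors start (num_positions - 1)) (pvGetWord num_sensors start 0) then
      some start
    else none
  else
    match pvLoopB num_positions num_sensors [(pvBudgetB num_sensors, start, PySem.Set.ofList [0], [1, 0])] with
    | some r => r
    | none => none                                         -- budget exhausted: unreachable (pvSim)

-- ===== PRECONDITION & SPEC =====
def Spec_find_stgc (num_positions : Int) (num_sensors : Int) (out : Option (List Int)) : Prop := out = find_stgc_alt num_positions num_sensors
instance (num_positions : Int) (num_sensors : Int) (out : Option (List Int)) : Decidable (Spec_find_stgc num_positions num_sensors out) := by unfold Spec_find_stgc; infer_instance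

-- ===== CLAIM (what is proved, stated in full; the proofs are below) =====
def Claim_equal_find_stgc : Prop := ∀ (num_positions : Int) (num_sensors : Int), Dom_find_stgc num_positions num_sensors → Spec_find_stgc num_positions num_sensors (find_stgc num_positions num_sensors)

-- ===== LEMMAS AND PROOFS =====

lemma pvBor_step (w b : Int) (k N : Nat) (hw0 : 0 ≤ w) (hw : w < 2 ^ N)
    (hb : b = 0 ∨ b = 1) (hk : k < N) :
    0 ≤ PySem.Int.bor w (b <<< k) ∧ PySem.Int.bor w (b <<< k) < 2 ^ N := by
  have hcast : ((2 ^ N : Nat) : Int) = 2 ^ N := by push_cast; ring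
  rcases hb with hb | hb <;> subst hb
  · have h0 : (0:Int) <<< k = 0 := by rw [Int.shiftLeft_eq]; ring
    rw [h0, PySem.Int.bor_zero]; exact ⟨hw0, hw⟩
  · rw [Int.shiftLeft_eq, one_mul, PySem.Int.bor_of_nonneg hw0 (by positivity)]
    have h1 : w.toNat < 2 ^ N := by omega
    have h2 : ((2:Int) ^ k).toNat = 2 ^ k := by
      rw [show ((2:Int) ^ k) = ((2 ^ k : Nat) : Int) by push_cast; ring]
      exact Int.toNat_natCast _
    have h3 : (w.toNat ||| ((2:Int) ^ k).toNat) < 2 ^ N := by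
      rw [h2]; exact Nat.or_lt_two_pow h1 (Nat.pow_lt_pow_right (by omega) hk)
    refine ⟨by positivity, by omega⟩

lemma pvGetWord_bound (ns : Int) (track : List Int) (pos : Int)
    (hb : ∀ b ∈ track, b = 0 ∨ b = 1) :
    0 ≤ pvGetWord ns track pos ∧ pvGetWord ns track pos < 2 ^ ns.toNat := by
  have haux : ∀ (L : List Nat) (w : Int), (∀ k ∈ L, k < ns.toNat) → 0 ≤ w → w < 2 ^ ns.toNat →
      0 ≤ L.foldl (fun word (k : Nat) =>
        PySem.Int.bor word
          (((PySem.List.pyGet? track (PySem.Int.mod (pos + (k:Int)) (track.length : Int))).getD 0) <<< k)) w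
      ∧ L.foldl (fun word (k : Nat) =>
        PySem.Int.bor word
          (((PySem.List.pyGet? track (PySem.Int.mod (pos + (k:Int)) (track.length : Int))).getD 0) <<< k)) w < 2 ^ ns.toNat := by
    intro L
    induction L with
    | nil => intro w _ hk0 hk1; exact ⟨hk0, hk1⟩
    | cons k L ih =>
      intro w h hw0 hw1
      rw [List.foldl_cons]
      have hbit : ((PySem.List.pyGet? track (PySem.Int.mod (pos + (k:Int)) (track.length : Int))).getD 0) = 0
          ∨ ((PySem.List.pyGet? track (PySem.Int.mod (pos + (k:Int)) (track.length : Int))).getD 0) = 1 := by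
        cases hg : PySem.List.pyGet? track (PySem.Int.mod (pos + (k:Int)) (track.length : Int)) with
        | none => left; rfl
        | some x => simpa using hb x (PySem.List.mem_of_pyGet?_eq_some (xs := track) hg)
      have hstep := pvBor_step w _ k ns.toNat hw0 hw1 hbit (h k (by simp))
      exact ih _ (fun j hj => h j (by simp [hj])) hstep.1 hstep.2
  have h20 : (0:Int) < 2 ^ ns.toNat := by positivity
  have hmain := haux (List.range ns.toNat) 0 (by intro k hk; rw [List.mem_range] at hk; omega) le_rfl h20
  unfold pvGetWord
  rw [PySem.List.pyRange_one, List.foldl_map]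
  simpa using hmain

lemma pvCard_bound (u : List Int) (N : Nat) (hn : u.Nodup) (hr : ∀ w ∈ u, 0 ≤ w ∧ w < 2 ^ N) :
    u.length ≤ 2 ^ N := by
  classical
  have hcast : ((2 ^ N : Nat) : Int) = 2 ^ N := by push_cast; ring
  have hmap : (u.map Int.toNat).Nodup := by
    refine List.Nodup.map_on ?_ hn
    intro a ha b hb hab
    have := (hr a ha).1; have := (hr b hb).1; omega
  have hlt : ∀ x ∈ u.map Int.toNat, x < 2 ^ N := by
    intro x hx
    rcases List.mem_map.mp hx with ⟨a, ha, rfl⟩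
    have h1 := (hr a ha).1; have h2 := (hr a ha).2; omega
  have hsub : (u.map Int.toNat).toFinset ⊆ Finset.range (2 ^ N) := by
    intro x hx
    simp only [List.mem_toFinset] at hx
    exact Finset.mem_range.mpr (hlt x hx)
  have hc := Finset.card_le_card hsub
  rw [List.toFinset_card_of_nodup hmap, Finset.card_range, List.length_map] at hc
  exact hc

def pvInv (ns : Int) (track : List Int) (used : PySem.Set Int) : Prop :=
  (∀ b ∈ track, b = 0 ∨ b = 1) ∧ used.Nodup ∧
  (∀ w ∈ used, 0 ≤ w ∧ w < 2 ^ ns.toNat) ∧ ns ≤ (track.length : Int)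

lemma pvSuf (np ns : Int) : ∀ f : Nat,
    (∀ track used, pvInv ns track used → 2 ^ ns.toNat < used.length + f →
      pvBacktrackA np ns f track used ≠ none)
    ∧ (∀ bs track used, pvInv ns track used → (∀ b ∈ bs, b = 0 ∨ b = 1) →
        2 ^ ns.toNat < used.length + f + 1 →
        pvTryBitsA np ns (pvBacktrackA np ns f) track used bs ≠ none) := by
  intro f
  induction f with
  | zero =>
    have hback : ∀ track used, pvInv ns track used → 2 ^ ns.toNat < used.length + 0 →
        pvBacktrackA np ns 0 track used ≠ none := by
      intro track used hInv hlt
      have := pvCard_bound used _ hInv.2.1 hInv.2.2.1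
      omega
    refine ⟨hback, ?_⟩
    intro bs
    induction bs with
    | nil => intro track used _ _ _; simp [pvTryBitsA]
    | cons b bs ihbs =>
      intro track used hInv hbs hlt
      have hcur : (0:Int) ≤ ((track ++ [b]).length : Int) - ns := by
        have := hInv.2.2.2; simp; omega
      simp only [pvTryBitsA]
      rw [if_pos hcur]
      set cand := track ++ [b] with hcand
      set nw := pvGetWord ns cand ((cand.length : Int) - ns) with hnw
      set pw := pvGetWord ns cand ((cand.length : Int) - ns - 1) with hpw
      cases hg : (!(PySem.Set.contains used nw) && pvIsGray pw nw) with
      | false =>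
        exact ihbs track used hInv (fun x hx => hbs x (by simp [hx])) hlt
      | true =>
        -- child call with fuel 0: contradiction via counting on the grown set
        have hnotmem : nw ∉ used := by
          have := (Bool.and_eq_true _ _).mp hg |>.1
          simpa [PySem.Set.contains_iff] using this
        have hcb : ∀ x ∈ cand, x = 0 ∨ x = 1 := by
          rw [hcand]; intro x hx
          rcases List.mem_append.mp hx with h | h
          · exact hInv.1 x h
          · rw [List.mem_singleton] at h; subst h; exact hbs _ (by simp)
        have hwb := pvGetWord_bound ns cand ((cand.length : Int) - ns) hcb
        have hInv' : pvInv ns cand (PySem.Set.add used nw) := by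
          refine ⟨hcb, PySem.Set.nodup_add used nw hInv.2.1, ?_, ?_⟩
          · intro w hw
            rcases (PySem.Set.mem_add used nw w).mp hw with h | h
            · exact hInv.2.2.1 w h
            · subst h; exact hwb
          · have := hInv.2.2.2; simp; omega
        have hlen : (PySem.Set.add used nw).length = used.length + 1 := by
          rw [PySem.Set.add_of_not_mem hnotmem, List.length_append]; rfl
        have := pvCard_bound (PySem.Set.add used nw) _ hInv'.2.1 hInv'.2.2.1
        -- pvBacktrackA 0 = none, but counting forbids reaching here
        exact absurd hlt (by omega)
  | succ f ih =>
    have hback : ∀ track used, pvInv ns track used → 2 ^ ns.toNat < used.length + (f+1) →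
        pvBacktrackA np ns (f+1) track used ≠ none := by
      intro track used hInv hlt
      simp only [pvBacktrackA]
      by_cases hnp : (track.length : Int) = np
      · rw [if_pos hnp]; simp
      · rw [if_neg hnp]
        exact ih.2 [1,0] track used hInv (by intro x hx; simp at hx; omega) (by omega)
    refine ⟨hback, ?_⟩
    intro bs
    induction bs with
    | nil => intro track used _ _ _; simp [pvTryBitsA]
    | cons b bs ihbs =>
      intro track used hInv hbs hlt
      have hcur : (0:Int) ≤ ((track ++ [b]).length : Int) - ns := by
        have := hInv.2.2.2; simp; omega
      simp only [pvTryBitsA]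
      rw [if_pos hcur]
      set cand := track ++ [b] with hcand
      set nw := pvGetWord ns cand ((cand.length : Int) - ns) with hnw
      set pw := pvGetWord ns cand ((cand.length : Int) - ns - 1) with hpw
      cases hg : (!(PySem.Set.contains used nw) && pvIsGray pw nw) with
      | false =>
        exact ihbs track used hInv (fun x hx => hbs x (by simp [hx])) hlt
      | true =>
        have hnotmem : nw ∉ used := by
          have := (Bool.and_eq_true _ _).mp hg |>.1
          simpa [PySem.Set.contains_iff] using this
        have hcb : ∀ x ∈ cand, x = 0 ∨ x = 1 := by
          rw [hcand]; intro x hx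
          rcases List.mem_append.mp hx with h | h
          · exact hInv.1 x h
          · rw [List.mem_singleton] at h; subst h; exact hbs _ (by simp)
        have hwb := pvGetWord_bound ns cand ((cand.length : Int) - ns) hcb
        have hInv' : pvInv ns cand (PySem.Set.add used nw) := by
          refine ⟨hcb, PySem.Set.nodup_add used nw hInv.2.1, ?_, ?_⟩
          · intro w hw
            rcases (PySem.Set.mem_add used nw w).mp hw with h | h
            · exact hInv.2.2.1 w h
            · subst h; exact hwb
          · have := hInv.2.2.2; simp; omega
        have hlen : (PySem.Set.add used nw).length = used.length + 1 := by
          rw [PySem.Set.add_of_not_mem hnotmem, List.length_append]; rfl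
        have hchild := hback cand (PySem.Set.add used nw) hInv' (by omega)
        cases hres : pvBacktrackA np ns (f+1) cand (PySem.Set.add used nw) with
        | none => exact absurd hres hchild
        | some r =>
          cases r with
          | none => exact ihbs track used hInv (fun x hx => hbs x (by simp [hx])) hlt
          | some out => simp


lemma pvSim (np ns : Int) : ∀ (f : Nat) (bs track : List Int) (used : PySem.Set Int),
    ns ≤ (track.length : Int) →
    ∀ r, pvTryBitsA np ns (pvBacktrackA np ns f) track used bs = some r →
      ∀ rest,
        pvLoopB np ns ((f, track, used, bs) :: rest) =
          (match r with
           | none => pvLoopB np ns rest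
           | some out => some (some out)) := by
  intro f
  induction f with
  | zero =>
    intro bs
    induction bs with
    | nil =>
      intro track used hlen r hr
      simp only [pvTryBitsA] at hr
      injection hr with hr; subst hr
      intro rest
      simp [pvLoopB]
    | cons b bs ihbs =>
      intro track used hlen r hr
      have hcur : (0:Int) ≤ ((track ++ [b]).length : Int) - ns := by simp; omega
      simp only [pvTryBitsA] at hr
      rw [if_pos hcur] at hr
      set cand := track ++ [b] with hcand
      set nw := pvGetWord ns cand ((cand.length : Int) - ns) with hnwdef
      set pw := pvGetWord ns cand ((cand.length : Int) - ns - 1) with hpwdef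
      cases hg : (!(PySem.Set.contains used nw) && pvIsGray pw nw) with
      | true =>
        rw [hg] at hr
        simp [pvBacktrackA] at hr
      | false =>
        rw [hg] at hr
        have hgB : (PySem.Set.contains used nw || !(pvIsGray pw nw)) = true := by
          cases hcn : PySem.Set.contains used nw <;> cases hgr : pvIsGray pw nw <;> simp_all
        intro rest
        rw [show pvLoopB np ns ((0, track, used, b :: bs) :: rest)
              = pvLoopB np ns ((0, track, used, bs) :: rest) by
            simp only [pvLoopB]; rw [if_pos hgB]]
        exact ihbs track used hlen r hr rest
  | succ f ih =>
    intro bs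
    induction bs with
    | nil =>
      intro track used hlen r hr
      simp only [pvTryBitsA] at hr
      injection hr with hr; subst hr
      intro rest
      simp [pvLoopB]
    | cons b bs ihbs =>
      intro track used hlen r hr
      have hcur : (0:Int) ≤ ((track ++ [b]).length : Int) - ns := by simp; omega
      simp only [pvTryBitsA] at hr
      rw [if_pos hcur] at hr
      set cand := track ++ [b] with hcand
      set nw := pvGetWord ns cand ((cand.length : Int) - ns) with hnwdef
      set pw := pvGetWord ns cand ((cand.length : Int) - ns - 1) with hpwdef
      cases hg : (!(PySem.Set.contains used nw) && pvIsGray pw nw) with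
      | false =>
        rw [hg] at hr
        have hgB : (PySem.Set.contains used nw || !(pvIsGray pw nw)) = true := by
          cases hcn : PySem.Set.contains used nw <;> cases hgr : pvIsGray pw nw <;> simp_all
        intro rest
        rw [show pvLoopB np ns ((f + 1, track, used, b :: bs) :: rest)
              = pvLoopB np ns ((f + 1, track, used, bs) :: rest) by
            simp only [pvLoopB]; rw [if_pos hgB]]
        exact ihbs track used hlen r hr rest
      | true =>
        rw [hg] at hr
        have hgB : (PySem.Set.contains used nw || !(pvIsGray pw nw)) = false := by
          cases hcn : PySem.Set.contains used nw <;> cases hgr : pvIsGray pw nw <;> simp_all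
        cases hb2 : pvBacktrackA np ns (f+1) cand (PySem.Set.add used nw) with
        | none => rw [hb2] at hr; simp at hr
        | some child =>
          rw [hb2] at hr
          simp only [pvBacktrackA] at hb2
          by_cases hnp : ((cand.length : Int) = np)
          · rw [if_pos hnp] at hb2
            injection hb2 with hb2
            cases hgc : pvIsGray (pvGetWord ns cand (np - 1)) (pvGetWord ns cand 0) with
            | true =>
              rw [hgc] at hb2
              subst hb2
              injection hr with hr; subst hr
              intro rest
              simp only [pvLoopB]
              rw [if_neg (by rw [hgB]; exact Bool.false_ne_true), if_pos hnp, if_pos hgc]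
            | false =>
              rw [hgc] at hb2
              subst hb2
              intro rest
              rw [show pvLoopB np ns ((f + 1, track, used, b :: bs) :: rest)
                    = pvLoopB np ns ((f + 1, track, used, bs) :: rest) by
                  simp only [pvLoopB]
                  rw [if_neg (by rw [hgB]; exact Bool.false_ne_true), if_pos hnp,
                    if_neg (by rw [hgc]; exact Bool.false_ne_true)]]
              exact ihbs track used hlen r hr rest
          · rw [if_neg hnp] at hb2
            have hlen' : ns ≤ ((cand.length : Int)) := by rw [hcand]; simp; omega
            have h1 := ih [1, 0] cand (PySem.Set.add used nw) hlen' child hb2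
            cases child with
            | some out0 =>
              injection hr with hr; subst hr
              intro rest
              rw [show pvLoopB np ns ((f + 1, track, used, b :: bs) :: rest)
                    = pvLoopB np ns ((f, cand, PySem.Set.add used nw, [1, 0]) :: (f + 1, track, used, bs) :: rest) by
                  simp only [pvLoopB]
                  rw [if_neg (by rw [hgB]; exact Bool.false_ne_true), if_neg hnp]]
              exact h1 ((f + 1, track, used, bs) :: rest)
            | none =>
              intro rest
              rw [show pvLoopB np ns ((f + 1, track, used, b :: bs) :: rest)
                    = pvLoopB np ns ((f, cand, PySem.Set.add used nw, [1, 0]) :: (f + 1, track, used, bs) :: rest) by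
                  simp only [pvLoopB]
                  rw [if_neg (by rw [hgB]; exact Bool.false_ne_true), if_neg hnp]]
              rw [h1 ((f + 1, track, used, bs) :: rest)]
              exact ihbs track used hlen r hr rest

theorem pv_find_stgc_eq_alt (np ns : Int) :
    find_stgc np ns = find_stgc_alt np ns := by
  unfold find_stgc find_stgc_alt
  set start : List Int := List.replicate ns.toNat 0 with hstart
  set u0 : PySem.Set Int := PySem.Set.ofList [0] with hu0
  have hlen : ns ≤ (start.length : Int) := by
    rw [hstart, List.length_replicate]; exact Int.self_le_toNat ns
  have hunf : pvBacktrackA np ns (pvFuelA ns) start u0 =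
      (if (start.length : Int) = np then
        some (if pvIsGray (pvGetWord ns start (np - 1)) (pvGetWord ns start 0) then some start else none)
      else pvTryBitsA np ns (pvBacktrackA np ns (2 ^ ns.toNat + 1)) start u0 [1, 0]) := rfl
  show (match pvBacktrackA np ns (pvFuelA ns) start u0 with
        | some r => r | none => none) =
      (if (start.length : Int) = np then
          (if pvIsGray (pvGetWord ns start (np - 1)) (pvGetWord ns start 0) then some start else none)
        else match pvLoopB np ns [(pvBudgetB ns, start, u0, [1, 0])] with
          | some r => r | none => none)
  rw [hunf]
  by_cases hnp : ((start.length : Int) = np)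
  · rw [if_pos hnp, if_pos hnp]
  · rw [if_neg hnp, if_neg hnp]
    have hInv : pvInv ns start u0 := by
      refine ⟨?_, ?_, ?_, hlen⟩
      · intro b hb; left; exact List.eq_of_mem_replicate hb
      · exact PySem.Set.nodup_ofList [0]
      · intro w hw
        have : w = 0 := by simpa [hu0] using hw
        subst this
        exact ⟨le_rfl, by positivity⟩
    have hSuf := (pvSuf np ns (2 ^ ns.toNat + 1)).2 [1, 0] start u0 hInv
      (by intro x hx; simp at hx; omega) (by omega)
    cases hres : pvTryBitsA np ns (pvBacktrackA np ns (2 ^ ns.toNat + 1)) start u0 [1, 0] with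
    | none => exact absurd hres hSuf
    | some r =>
      have hloop := pvSim np ns (2 ^ ns.toNat + 1) [1, 0] start u0 hlen r hres []
      rw [show pvBudgetB ns = 2 ^ ns.toNat + 1 from rfl, hloop]
      cases r with
      | none => simp [pvLoopB]
      | some out => rfl

-- ===== VERDICT (by name: the statement is the Claim_ definition above) =====
theorem find_stgc_spec : Claim_equal_find_stgc := by
  unfold Claim_equal_find_stgc
  intro num_positions num_sensors _
  unfold Spec_find_stgc
  exact pv_find_stgc_eq_alt num_positions num_sensors
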